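-- pv_equiv track=rewrite | github.com/AliAnsariArshad/LeetCode | problems/Easy/Array[list]/NumbersOfPairs.py | number_of_pairs2
-- ===== SOURCE A (Python) =====
-- from collections import Counter
-- from typing import List
--
-- def number_of_pairs2(nums: List[int]) -> List[int]:
--     counter = Counter(nums)
--     pairs_count = 0
--     left_overs = 0
--     for _, values in counter.items():
--         pairs_count += values // 2
--         left_overs += values % 2
--     return [pairs_count, left_overs]
-- ===== SOURCE B (Python) =====
-- from typing import List
--
-- def number_of_pairs2(nums: List[int]) -> List[int]:
--     pairs = 0
--     unpaired = set()
--     for x in nums: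
--         if x in unpaired:
--             unpaired.discard(x)
--             pairs += 1
--         else:
--             unpaired.add(x)
--     return [pairs, len(unpaired)]
-- ===== Notes on version B (the rewrite author's own statement) =====
-- stated objective: alternative
-- what changed: Instead of building a Counter and summing v//2 and v%2 over its items, B makes one pass over the raw list toggling each value in a set of currently-unpaired values (remove+count a pair if present, add if absent), returning [pairs, len(set)] with no division arithmetic.
import Mathlib
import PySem

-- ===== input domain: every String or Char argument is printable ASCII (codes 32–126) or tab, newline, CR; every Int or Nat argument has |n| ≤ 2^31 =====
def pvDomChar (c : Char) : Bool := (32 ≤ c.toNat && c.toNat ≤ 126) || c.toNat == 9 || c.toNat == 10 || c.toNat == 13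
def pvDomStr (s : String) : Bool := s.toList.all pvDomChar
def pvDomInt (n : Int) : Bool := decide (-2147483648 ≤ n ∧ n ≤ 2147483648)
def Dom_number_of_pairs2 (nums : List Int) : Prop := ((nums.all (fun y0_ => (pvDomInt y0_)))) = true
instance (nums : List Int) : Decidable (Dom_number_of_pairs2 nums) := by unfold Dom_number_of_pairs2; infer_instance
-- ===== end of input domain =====

-- B replaces A's Counter-then-sum (v//2, v%2 over items) with a single pass over the raw
-- list toggling a set of currently-unpaired values (alternative decomposition, same cost).

-- ===== PORT A =====
def number_of_pairs2 (nums : List Int) : List Int :=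
  let counter := PySem.Dict.counter nums
  let res := counter.items.foldl
    (fun (st : Int × Int) kv =>
      (st.1 + PySem.Int.floordiv kv.2 2, st.2 + PySem.Int.mod kv.2 2)) (0, 0)
  [res.1, res.2]

-- ===== PORT B =====
def pvToggle (st : Int × PySem.Set Int) (x : Int) : Int × PySem.Set Int :=
  if PySem.Set.contains st.2 x = true then (st.1 + 1, PySem.Set.discard st.2 x)
  else (st.1, PySem.Set.add st.2 x)

def number_of_pairs2_alt (nums : List Int) : List Int :=
  let st := nums.foldl pvToggle (0, PySem.Set.empty)
  [st.1, PySem.Set.len st.2]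

-- ===== PRECONDITION & SPEC =====
def Spec_number_of_pairs2 (nums : List Int) (out : List Int) : Prop := out = number_of_pairs2_alt nums
instance (nums : List Int) (out : List Int) : Decidable (Spec_number_of_pairs2 nums out) := by unfold Spec_number_of_pairs2; infer_instance

-- ===== CLAIM (what is proved, stated in full; the proofs are below) =====
def Claim_equal_number_of_pairs2 : Prop := ∀ (nums : List Int), Dom_number_of_pairs2 nums → Spec_number_of_pairs2 nums (number_of_pairs2 nums)

-- ===== LEMMAS AND PROOFS =====

-- A's fold over Counter items is the pair of sums of count//2 and count%2 over the distinct keys.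
theorem pv_A_char (nums : List Int) :
    number_of_pairs2 nums =
      [(((PySem.Set.ofList nums).map (fun k => nums.count k / 2)).sum : Int),
       (((PySem.Set.ofList nums).map (fun k => nums.count k % 2)).sum : Int)] := by
  show _ = _
  simp only [number_of_pairs2]
  rw [PySem.Dict.items_counter, List.foldl_map]
  rw [PySem.List.foldl_prod_mk (f := fun a k => a + PySem.Int.floordiv ((nums.count k : Int)) 2)
      (g := fun a k => a + PySem.Int.mod ((nums.count k : Int)) 2)]
  rw [PySem.List.foldl_add, PySem.List.foldl_add]
  simp only [zero_add]
  congr 1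
  · push_cast
    rw [List.map_map]
    refine congrArg List.sum (List.map_congr_left ?_)
    intro k _
    simp
  · congr 1
    push_cast
    rw [List.map_map]
    refine congrArg List.sum (List.map_congr_left ?_)
    intro k _
    simp

theorem pv_sum_split (c : Int → Nat) (S : List Int) :
    (S.map (fun k => c k % 2)).sum = (S.filter (fun k => c k % 2 = 1)).length ∧
    2 * (S.map (fun k => c k / 2)).sum + (S.map (fun k => c k % 2)).sum
      = (S.map c).sum := by
  induction S with
  | nil => simp
  | cons a S ih =>
    obtain ⟨h1, h2⟩ := ih
    by_cases hp : c a % 2 = 1 <;> simp [hp, h1] <;> omega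

theorem pv_length_discard (s : List Int) (x : Int) (hn : s.Nodup) (hx : x ∈ s) :
    (PySem.Set.discard s x).length + 1 = s.length := by
  induction s with
  | nil => cases hx
  | cons a s ih =>
    rcases List.nodup_cons.mp hn with ⟨ha, hs⟩
    by_cases h : a = x
    · subst h
      have hd : PySem.Set.discard (a :: s) a = s := by
        simp only [PySem.Set.discard, List.filter_cons, beq_self_eq_true, Bool.not_true]
        exact List.filter_eq_self.mpr (by intro y hy; simp; rintro rfl; exact ha hy)
      simp [hd]
    · have hx' : x ∈ s := (List.mem_cons.mp hx).resolve_left (fun he => h he.symm)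
      have hd : PySem.Set.discard (a :: s) x = a :: PySem.Set.discard s x := by
        simp only [PySem.Set.discard, List.filter_cons]
        simp [h]
      have := ih hs hx'
      rw [hd]
      simp only [List.length_cons]
      omega

-- Loop invariant for B: the set holds exactly the keys with odd count so far (no duplicates),
-- and twice the pair counter plus the set size is the number of elements consumed.
theorem pv_loop_inv (rest : List Int) : ∀ (pre : List Int) (p : Int) (s : PySem.Set Int),
    s.Nodup → (∀ k, k ∈ s ↔ pre.count k % 2 = 1) →
    2 * p + (s.length : Int) = pre.length →
    (rest.foldl pvToggle (p, s)).2.Nodup ∧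
    (∀ k, k ∈ (rest.foldl pvToggle (p, s)).2 ↔ (pre ++ rest).count k % 2 = 1) ∧
    2 * (rest.foldl pvToggle (p, s)).1 + ((rest.foldl pvToggle (p, s)).2.length : Int)
      = (pre ++ rest).length := by
  induction rest with
  | nil => intro pre p s hn hm hl; simpa using ⟨hn, hm, hl⟩
  | cons x rest ih =>
    intro pre p s hn hm hl
    by_cases hx : x ∈ s
    · have hstep : (x :: rest).foldl pvToggle (p, s)
          = rest.foldl pvToggle (p + 1, PySem.Set.discard s x) := by
        simp [pvToggle, hx]
      rw [hstep]
      have hodd : pre.count x % 2 = 1 := (hm x).mp hx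
      have h := ih (pre ++ [x]) (p + 1) (PySem.Set.discard s x)
        (PySem.Set.nodup_discard s x hn)
        (by
          intro k
          rw [PySem.Set.mem_discard]
          by_cases hk : k = x
          · subst hk; simp [List.count_append]; omega
          · simp [hm k, List.count_append, hk, Ne.symm hk])
        (by
          have := pv_length_discard s x hn hx
          simp only [List.length_append, List.length_cons, List.length_nil]
          push_cast
          omega)
      simpa [List.append_assoc] using h
    · have hstep : (x :: rest).foldl pvToggle (p, s)
          = rest.foldl pvToggle (p, PySem.Set.add s x) := by
        simp [pvToggle, hx]
      rw [hstep]
      have heven : ¬ pre.count x % 2 = 1 := fun h => hx ((hm x).mpr h)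
      have h := ih (pre ++ [x]) p (PySem.Set.add s x)
        (PySem.Set.nodup_add s x hn)
        (by
          intro k
          rw [PySem.Set.mem_add]
          by_cases hk : k = x
          · subst hk; simp [List.count_append]; omega
          · simp [hm k, List.count_append, hk, Ne.symm hk])
        (by
          rw [PySem.Set.add_of_not_mem hx]
          simp only [List.length_append, List.length_cons, List.length_nil]
          push_cast
          omega)
      simpa [List.append_assoc] using h

-- ===== VERDICT (by name: the statement is the Claim_ definition above) =====
theorem number_of_pairs2_spec : Claim_equal_number_of_pairs2 := by
  intro nums _
  show number_of_pairs2 nums = number_of_pairs2_alt nums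
  obtain ⟨hN, hM, hL⟩ := pv_loop_inv nums [] 0 PySem.Set.empty
    (by simp [PySem.Set.empty]) (by simp [PySem.Set.empty]) (by simp [PySem.Set.empty])
  simp only [List.nil_append] at hM hL
  set st := nums.foldl pvToggle (0, PySem.Set.empty) with hst
  obtain ⟨hsum1, hsum2⟩ := pv_sum_split (fun k => nums.count k) (PySem.Set.ofList nums)
  have hperm : st.2.Perm ((PySem.Set.ofList nums).filter (fun k => nums.count k % 2 = 1)) := by
    rw [List.perm_ext_iff_of_nodup hN (List.Nodup.filter _ (PySem.Set.nodup_ofList nums))]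
    intro k
    simp only [List.mem_filter, PySem.Set.mem_ofList, decide_eq_true_eq]
    rw [hM k]
    constructor
    · intro h
      exact ⟨List.count_pos_iff.mp (by omega), h⟩
    · exact fun h => h.2
  have hlen : st.2.length = ((PySem.Set.ofList nums).map (fun k => nums.count k % 2)).sum := by
    rw [hsum1]; exact hperm.length_eq
  have htot : ((PySem.Set.ofList nums).map (fun k => nums.count k)).sum = nums.length := by
    have hp : (PySem.Set.ofList nums).Perm nums.dedup := by
      rw [List.perm_ext_iff_of_nodup (PySem.Set.nodup_ofList nums) nums.nodup_dedup]
      intro k; simp [PySem.Set.mem_ofList]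
    calc ((PySem.Set.ofList nums).map (fun k => nums.count k)).sum
        = (nums.dedup.map (fun k => nums.count k)).sum := (hp.map _).sum_eq
      _ = nums.length := List.sum_map_count_dedup_eq_length nums
  rw [pv_A_char, number_of_pairs2_alt]
  simp only [← hst, PySem.Set.len]
  have h1 : (((PySem.Set.ofList nums).map (fun k => nums.count k / 2)).sum : Int) = st.1 := by
    omega
  rw [h1, hlen]
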